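-- pv_equiv track=rewrite | github.com/emil64/ROPOverflow | address_push.py | get_mask_xor
-- ===== SOURCE A (Python) =====
-- def get_mask_xor(address):
--     mask = 0
--     for i in range(4):
--         for mask_byte in range(1,256):
--             if ((address >> (8 * i)) % 256) ^ mask_byte != 0:
--                 mask += mask_byte << (8*i)
--                 break
--     return mask, (address^mask)
-- ===== SOURCE B (Python) =====
-- def get_mask_xor(address):
--     mask = 0
--     for i in range(4):
--         b = (address >> (8 * i)) % 256
--         mask += (2 if b == 1 else 1) << (8 * i)
--     return mask, address ^ mask
-- ===== Notes on version B (the rewrite author's own statement) =====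
-- stated objective: simpler
-- what changed: The inner linear search over the candidate byte range for the first value XOR-differing from the address byte is replaced by a direct closed-form choice of that smallest candidate.
import Mathlib
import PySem

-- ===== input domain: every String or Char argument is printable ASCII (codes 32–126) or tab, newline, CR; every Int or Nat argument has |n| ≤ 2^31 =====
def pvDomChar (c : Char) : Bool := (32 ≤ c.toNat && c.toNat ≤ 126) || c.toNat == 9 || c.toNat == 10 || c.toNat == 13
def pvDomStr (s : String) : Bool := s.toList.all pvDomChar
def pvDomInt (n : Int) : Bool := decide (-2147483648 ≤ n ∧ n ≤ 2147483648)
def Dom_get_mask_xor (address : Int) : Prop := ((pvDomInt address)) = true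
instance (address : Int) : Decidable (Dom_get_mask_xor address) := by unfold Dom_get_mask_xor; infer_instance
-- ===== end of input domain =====

-- B replaces A's inner linear search over 1..255 by its closed form (2 if the byte is 1, else 1): simpler.

-- ===== PORT A =====
-- inner 'for mask_byte in range(1,256): … break' loop of A: returns the updated mask
-- (mask + mask_byte << 8i for the first qualifying mask_byte), or mask unchanged if none qualifies
def pvInnerA (address mask i : Int) : List Int → Int
  | [] => mask
  | mb :: rest =>
      if PySem.Int.bxor (PySem.Int.mod (address >>> (8 * i).toNat) 256) mb ≠ 0 then
        mask + (mb <<< (8 * i).toNat)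
      else pvInnerA address mask i rest

def get_mask_xor (address : Int) : Int × Int :=
  let mask := (PySem.List.pyRange 0 4 1).foldl
    (fun mask i => pvInnerA address mask i (PySem.List.pyRange 1 256 1)) 0
  (mask, PySem.Int.bxor address mask)

-- ===== PORT B =====
def get_mask_xor_alt (address : Int) : Int × Int :=
  let mask := (PySem.List.pyRange 0 4 1).foldl
    (fun mask i =>
      let b := PySem.Int.mod (address >>> (8 * i).toNat) 256
      mask + ((if b = 1 then (2 : Int) else 1) <<< (8 * i).toNat)) 0
  (mask, PySem.Int.bxor address mask)

-- ===== PRECONDITION & SPEC =====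
def Spec_get_mask_xor (address : Int) (out : Int × Int) : Prop := out = get_mask_xor_alt address
instance (address : Int) (out : Int × Int) : Decidable (Spec_get_mask_xor address out) := by unfold Spec_get_mask_xor; infer_instance

-- ===== CLAIM (what is proved, stated in full; the proofs are below) =====
def Claim_equal_get_mask_xor : Prop := ∀ (address : Int), Dom_get_mask_xor address → Spec_get_mask_xor address (get_mask_xor address)

-- ===== LEMMAS AND PROOFS =====

-- XOR of two bytes is zero iff they are equal (for nonnegative ints)
theorem pv_bxor_eq_zero {a b : Int} (ha : 0 ≤ a) (hb : 0 ≤ b) :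
    PySem.Int.bxor a b = 0 ↔ a = b := by
  rw [PySem.Int.bxor_of_nonneg ha hb]
  constructor
  · intro h
    have hx : a.toNat ^^^ b.toNat = 0 := by exact_mod_cast h
    have := Nat.xor_eq_zero_iff.mp hx
    omega
  · intro h
    subst h
    simp [Nat.xor_self]

-- A's inner search over range(1,256) equals B's closed form
theorem pvInnerA_closed (address mask i : Int) :
    pvInnerA address mask i (PySem.List.pyRange 1 256 1)
      = mask + ((if PySem.Int.mod (address >>> (8 * i).toNat) 256 = 1 then (2 : Int) else 1)
                  <<< (8 * i).toNat) := by
  set b := PySem.Int.mod (address >>> (8 * i).toNat) 256 with hb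
  have hb0 : 0 ≤ b := PySem.Int.mod_nonneg _ (by norm_num)
  rw [PySem.List.pyRange_one_cons (by norm_num), PySem.List.pyRange_one_cons (by norm_num)]
  by_cases h1 : b = 1
  · have hx1 : ¬ PySem.Int.bxor b 1 ≠ 0 := by
      simp [(pv_bxor_eq_zero hb0 (by norm_num)).mpr h1]
    have hx2 : PySem.Int.bxor b (1 + 1) ≠ 0 := fun h => by
      have := (pv_bxor_eq_zero hb0 (by norm_num)).mp h; omega
    rw [pvInnerA, if_neg hx1, pvInnerA, if_pos hx2, if_pos h1]
    norm_num
  · have hx1 : PySem.Int.bxor b 1 ≠ 0 := fun h => h1 ((pv_bxor_eq_zero hb0 (by norm_num)).mp h)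
    rw [pvInnerA, if_pos hx1, if_neg h1]

-- ===== VERDICT (by name: the statement is the Claim_ definition above) =====
theorem get_mask_xor_spec : Claim_equal_get_mask_xor := by
  intro address _
  show get_mask_xor address = get_mask_xor_alt address
  simp only [get_mask_xor, get_mask_xor_alt,
    show PySem.List.pyRange 0 4 1 = [0, 1, 2, 3] from by decide,
    List.foldl, pvInnerA_closed, Int.shiftLeft_natCast_right, Int.shiftRight_natCast_right]
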